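-- pv_equiv track=rewrite | github.com/b4sgren/adventOfCode | 2023/day11.py | parseData
-- ===== SOURCE A (Python) =====
-- def parseData(data):
--     graph = []
--     rows_with_galaxies = [False for _ in range(len(data))]
--     cols_with_galaxies = [False for _ in range(len(data[0]))]
--     counter = 0
--     for i, line in enumerate(data):
--         vals = list(line)[:-1]
--         while '#' in vals:
--             rows_with_galaxies[i] = True
--             idx = vals.index('#')
--             cols_with_galaxies[idx] = True
--             vals[idx] = str(counter)
--             counter += 1
--         graph.append(vals)
--
--     # Append space where no galaxies are in a row/col
--     offset = 0
--     for i, val in enumerate(rows_with_galaxies):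
--         if not val:
--             graph.insert(i + offset, ['.']*len(graph[0]))
--             offset += 1
--
--     offset = 0
--     for i, val in enumerate(cols_with_galaxies):
--         if not val:
--             for j in range(len(graph)):
--                 graph[j].insert(i+offset, '.')
--             offset += 1
--
--     return graph, counter
-- ===== SOURCE B (Python) =====
-- def _expand(cells, gaps):
--     # splice a '.' before each galaxy-free column position
--     out = []
--     prev = 0
--     for pos in gaps:
--         out.extend(cells[prev:pos])
--         out.append('.')
--         out.extend(cells[pos:pos + 1])
--         prev = pos + 1
--     out.extend(cells[prev:])
--     return out
--
--
-- def parseData(data):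
--     width = len(data[0])
--     col_has = [False] * width
--     labeled = []
--     counter = 0
--     for line in data:
--         cells = []
--         has = False
--         for j, ch in enumerate(line[:-1]):
--             if ch == '#':
--                 cells.append(str(counter))
--                 counter += 1
--                 col_has[j] = True
--                 has = True
--             else:
--                 cells.append(ch)
--         labeled.append((cells, has))
--     gaps = [j for j, has in enumerate(col_has) if not has]
--     blank = _expand(['.'] * (width - 1), gaps)
--     grid = []
--     for cells, has in labeled:
--         if not has:
--             grid.append(blank)
--         grid.append(_expand(cells, gaps))
--     return grid, counter
-- ===== Notes on version B (the rewrite author's own statement) =====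
-- stated objective: faster
-- what changed: Replaces A's repeated `'#' in vals`/index() relabeling loop and the two insert-with-offset expansion passes by one left-to-right labeling scan per line plus a single forward rebuild: galaxy-free column positions are collected once and each output row is built by splicing a '.' before each such position with plain slices, with a blank row emitted before each galaxy-free row.
import Mathlib
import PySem

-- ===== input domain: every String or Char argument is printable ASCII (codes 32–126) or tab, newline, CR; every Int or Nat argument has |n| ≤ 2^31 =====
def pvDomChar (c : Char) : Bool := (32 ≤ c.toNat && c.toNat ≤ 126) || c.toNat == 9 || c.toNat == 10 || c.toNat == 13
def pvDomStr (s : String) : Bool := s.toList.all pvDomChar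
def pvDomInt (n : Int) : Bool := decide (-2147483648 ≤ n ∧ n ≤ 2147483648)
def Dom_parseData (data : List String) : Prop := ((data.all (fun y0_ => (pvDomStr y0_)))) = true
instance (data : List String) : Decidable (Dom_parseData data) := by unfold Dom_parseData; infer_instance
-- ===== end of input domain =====

-- B replaces A's repeated `'#' in vals`/index() relabeling and the two insert-with-offset
-- expansion passes by one labeling scan per line and a single slice-splicing rebuild
-- (measurably faster on large grids in a timing run).

-- ===== PORT A =====
-- list(line) turns a string into a list of 1-character strings
def pvCell (c : Char) : String := String.ofList [c]

-- `while '#' in vals:` — fuel = number of '#' in vals: each iteration replaces the leftmost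
-- '#' by str(counter) (never '#'), so the Python loop runs exactly that many times.
-- `cols[idx] = True` raises IndexError when idx ≥ len(cols) (excluded by Pre_); List.set is
-- a no-op there, exact on Pre_.
def pdWhileA (fuel : Nat) (i : Int) (vals : List String) (rows cols : List Bool)
    (counter : Int) : List String × List Bool × List Bool × Int :=
  match fuel with
  | 0 => (vals, rows, cols, counter)
  | f + 1 =>
    if "#" ∈ vals then
      match PySem.List.index? vals "#" with
      | some idx =>
          pdWhileA f i (vals.set idx (PySem.Int.toStr counter)) (rows.set i.toNat true)
            (cols.set idx true) (counter + 1)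
      | none => (vals, rows, cols, counter)
    else (vals, rows, cols, counter)

-- one step of `for i, line in enumerate(data): …`
def pdStepLineA (st : List (List String) × List Bool × List Bool × Int) (p : Int × String) :
    List (List String) × List Bool × List Bool × Int :=
  let vals := PySem.List.slice (p.2.toList.map pvCell) none (some (-1))
  let r := pdWhileA (vals.count "#") p.1 vals st.2.1 st.2.2.1 st.2.2.2
  (st.1 ++ [r.1], r.2.1, r.2.2.1, r.2.2.2)

-- one step of the blank-row pass (graph.insert(i+offset, ['.']*len(graph[0])))
def pdStepRowA (st : List (List String) × Int) (p : Int × Bool) : List (List String) × Int :=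
  if !p.2 then
    (PySem.List.insert st.1 (p.1 + st.2) (List.replicate (st.1.headD []).length "."), st.2 + 1)
  else st

-- one step of the blank-column pass (for j in range(len(graph)): graph[j].insert(i+offset,'.'))
def pdStepColA (st : List (List String) × Int) (p : Int × Bool) : List (List String) × Int :=
  if !p.2 then
    ((PySem.List.pyRange 0 (st.1.length : Int) 1).foldl
        (fun g j => g.set j.toNat (PySem.List.insert (PySem.List.pyGetD g j []) (p.1 + st.2) "."))
        st.1,
      st.2 + 1)
  else st

def parseData (data : List String) : List (List String) × Int :=
  -- len(data[0]) raises IndexError on empty data (excluded by Pre_); getD "" is exact on Pre_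
  let rows0 : List Bool := List.replicate data.length false
  let cols0 : List Bool := List.replicate ((PySem.List.pyGet? data 0).getD "").toList.length false
  let s1 := (PySem.List.enumerate data 0).foldl pdStepLineA ([], rows0, cols0, 0)
  let s2 := (PySem.List.enumerate s1.2.1 0).foldl pdStepRowA (s1.1, 0)
  let s3 := (PySem.List.enumerate s1.2.2.1 0).foldl pdStepColA (s2.1, 0)
  (s3.1, s1.2.2.2)

-- ===== PORT B =====
-- the inner `for j, ch in enumerate(line[:-1])` loop of Source B: label galaxies, mark columns
-- (`col_has[j] = True` raises IndexError when j ≥ len(col_has), excluded by Pre_; set no-ops)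
def pdScan (cs : List Char) (j : Nat) (cols : List Bool) (counter : Int) :
    List String × List Bool × Int × Bool :=
  match cs with
  | [] => ([], cols, counter, false)
  | c :: rest =>
    if c = '#' then
      let r := pdScan rest (j + 1) (cols.set j true) (counter + 1)
      (PySem.Int.toStr counter :: r.1, r.2.1, r.2.2.1, true)
    else
      let r := pdScan rest (j + 1) cols counter
      (String.ofList [c] :: r.1, r.2.1, r.2.2.1, r.2.2.2)

-- Source B's _expand loop: state (out, prev); each gap position splices cells[prev:pos], '.', cells[pos:pos+1]
def pdSpliceLoop (cells : List String) (out : List String) (prev : Int) :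
    List Int → List String × Int
  | [] => (out, prev)
  | pos :: rest =>
      pdSpliceLoop cells
        (out ++ PySem.List.slice cells (some prev) (some pos) ++ ["."]
             ++ PySem.List.slice cells (some pos) (some (pos + 1)))
        (pos + 1) rest

-- Source B's _expand: the loop, then the trailing out.extend(cells[prev:])
def pdExpandB (cells : List String) (gaps : List Int) : List String :=
  let s := pdSpliceLoop cells [] 0 gaps
  s.1 ++ PySem.List.slice cells (some s.2) none

-- one step of `for line in data:` of Source B
def pdStepLineB (st : List (List String × Bool) × List Bool × Int) (line : String) :
    List (List String × Bool) × List Bool × Int :=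
  let r := pdScan line.toList.dropLast 0 st.2.1 st.2.2
  (st.1 ++ [(r.1, r.2.2.2)], r.2.1, r.2.2.1)

def parseData_alt (data : List String) : List (List String) × Int :=
  -- len(data[0]) raises IndexError on empty data (excluded by Pre_); getD "" is exact on Pre_
  let width := ((PySem.List.pyGet? data 0).getD "").toList.length
  let s := data.foldl pdStepLineB ([], List.replicate width false, 0)
  let gaps := ((PySem.List.enumerate s.2.1 0).filter (fun p => !p.2)).map (·.1)
  let blank := pdExpandB (List.replicate (width - 1) ".") gaps
  (s.1.foldl
      (fun g p => g ++ (if p.2 then [pdExpandB p.1 gaps] else [blank, pdExpandB p.1 gaps])) [],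
    s.2.2)

-- ===== PRECONDITION & SPEC =====
-- Pre_ excludes exactly the inputs where the Python A raises IndexError: empty `data`
-- (`data[0]`), and a '#' in some line[:-1] at a column index ≥ len(data[0])
-- (`cols_with_galaxies[idx] = True`). B raises there as well.
def Pre_parseData (data : List String) : Prop :=
  data ≠ [] ∧ ∀ s ∈ data, '#' ∉ s.toList.dropLast.drop (data.headD "").toList.length
instance (data : List String) : Decidable (Pre_parseData data) := by
  unfold Pre_parseData; infer_instance

def pvWitness_parseData : List String := ["#.x", ".#x", "..x"]

def Spec_parseData (data : List String) (out : List (List String) × Int) : Prop :=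
  out = parseData_alt data
instance (data : List String) (out : List (List String) × Int) : Decidable (Spec_parseData data out) := by
  unfold Spec_parseData; infer_instance

-- ===== CLAIM (what is proved, stated in full; the proofs are below) =====
def Claim_equal_parseData : Prop :=
  ∀ (data : List String), Dom_parseData data → Pre_parseData data →
    Spec_parseData data (parseData data)

-- ===== LEMMAS AND PROOFS =====

-- proof-side recursive description of B's per-line fold
def pdLines (data : List String) (cols : List Bool) (counter : Int) :
    List (List String × Bool) × List Bool × Int :=
  match data with
  | [] => ([], cols, counter)
  | line :: rest =>
    let r := pdScan line.toList.dropLast 0 cols counter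
    let t := pdLines rest r.2.1 r.2.2.1
    ((r.1, r.2.2.2) :: t.1, t.2.1, t.2.2)

-- proof-side: the grid after A's blank-row pass (a blank before each galaxy-free row)
def pvInterleave (blank : List String) : List (List String × Bool) → List (List String)
  | [] => []
  | p :: ps => (if p.2 then [p.1] else [blank, p.1]) ++ pvInterleave blank ps

-- proof-side: what A's column pass does to one row
def pdColRow (fs : List Bool) (k off : Nat) (r : List String) : List String :=
  match fs with
  | [] => r
  | f :: fs =>
    if f then pdColRow fs (k + 1) off r
    else pdColRow fs (k + 1) (off + 1) (PySem.List.insert r ((k : Int) + (off : Int)) ".")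

-- proof-side: merge description of one expanded row ('.' before each galaxy-free column)
def pdExpand (cols : List Bool) (cells : List String) : List String :=
  match cols, cells with
  | [], cs => cs
  | g :: gs, [] => (if g then [] else ["."]) ++ pdExpand gs []
  | g :: gs, c :: cs => (if g then [c] else [".", c]) ++ pdExpand gs cs

-- proof-side: the positions of the galaxy-free columns, as gathered by Source B's comprehension
def gapsOf (k : Nat) : List Bool → List Int
  | [] => []
  | f :: fs => (if f then [] else [(k : Int)]) ++ gapsOf (k + 1) fs

lemma digitChar_ne_hash (k : Nat) : Nat.digitChar k ≠ '#' := by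
  intro h
  rcases Nat.lt_or_ge k 16 with h16 | h16
  · interval_cases k <;> exact absurd h (by decide)
  · have hs : Nat.digitChar k = '*' := by
      unfold Nat.digitChar
      rw [if_neg (by omega), if_neg (by omega), if_neg (by omega), if_neg (by omega),
          if_neg (by omega), if_neg (by omega), if_neg (by omega), if_neg (by omega),
          if_neg (by omega), if_neg (by omega), if_neg (by omega), if_neg (by omega),
          if_neg (by omega), if_neg (by omega), if_neg (by omega), if_neg (by omega)]
    rw [hs] at h
    exact absurd h (by decide)

lemma toDigitsCore_mem (b : Nat) (f : Nat) :
    ∀ (n : Nat) (ds : List Char) (c : Char), c ∈ Nat.toDigitsCore b f n ds →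
      c ∈ ds ∨ ∃ k, c = Nat.digitChar k := by
  induction f with
  | zero => intro n ds c h; exact Or.inl h
  | succ f ih =>
    intro n ds c h
    rw [Nat.toDigitsCore] at h
    by_cases hz : n / b = 0
    · rw [if_pos hz] at h
      rcases List.mem_cons.mp h with h | h
      · exact Or.inr ⟨n % b, h⟩
      · exact Or.inl h
    · rw [if_neg hz] at h
      rcases ih _ _ _ h with h | h
      · rcases List.mem_cons.mp h with h | h
        · exact Or.inr ⟨n % b, h⟩
        · exact Or.inl h
      · exact Or.inr h

lemma toStr_ne_hash (n : Int) : PySem.Int.toStr n ≠ "#" := by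
  intro h
  have hl : PySem.Int.toChars n = ['#'] := by
    have := congrArg String.toList h
    rw [PySem.Int.toList_toStr] at this
    simpa using this
  unfold PySem.Int.toChars at hl
  split_ifs at hl with hneg
  · have := congrArg List.head? hl
    simp at this
  · have hmem : '#' ∈ Nat.toDigits 10 n.toNat := by rw [hl]; simp
    unfold Nat.toDigits at hmem
    rcases toDigitsCore_mem _ _ _ _ _ hmem with h' | ⟨k, hk⟩
    · simp at h'
    · exact digitChar_ne_hash k hk.symm

lemma insert_ge {α : Type} (xs : List α) (p : Nat) (v : α) (h : xs.length ≤ p) :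
    PySem.List.insert xs (p : Int) v = xs ++ [v] := by
  unfold PySem.List.insert PySem.List.sliceIndices
  have h1 : ¬ ((p:Int) < 0) := by omega
  have h2 : ¬ ((1:Int) < 0) := by omega
  simp only [if_neg h1, if_neg h2]
  have h3 : min (p:Int) (xs.length:Int) = (xs.length:Int) := by omega
  rw [h3]
  simp

lemma count_map_cell (cs : List Char) : (cs.map pvCell).count "#" = cs.count '#' := by
  induction cs with
  | nil => rfl
  | cons c rest ih =>
    simp only [List.map_cons, List.count_cons, ih]
    congr 1
    have : (pvCell c == "#") = (c == '#') := by
      by_cases hc : c = '#'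
      · subst hc; rfl
      · have hne : pvCell c ≠ "#" := fun hs => hc (by
          have := congrArg String.toList hs
          simpa [pvCell] using this)
        simp [hne, hc]
    rw [this]

lemma scan_len (cs : List Char) : ∀ (j : Nat) (cols : List Bool) (c : Int),
    (pdScan cs j cols c).1.length = cs.length := by
  induction cs with
  | nil => intro j cols c; rfl
  | cons c rest ih =>
    intro j cols cnt
    by_cases hc : c = '#' <;> simp [pdScan, hc, ih]

lemma whileA_eq_scan (cs : List Char) :
    ∀ (done : List String) (i : Int) (rows cols : List Bool) (counter : Int),
      "#" ∉ done →
      pdWhileA (cs.count '#') i (done ++ cs.map pvCell) rows cols counter =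
        (done ++ (pdScan cs done.length cols counter).1,
         (if (pdScan cs done.length cols counter).2.2.2 then rows.set i.toNat true else rows),
         (pdScan cs done.length cols counter).2.1,
         (pdScan cs done.length cols counter).2.2.1) := by
  induction cs with
  | nil =>
    intro done i rows cols counter hd
    simp [pdScan, pdWhileA]
  | cons c rest ih =>
    intro done i rows cols counter hd
    by_cases hc : c = '#'
    · subst hc
      have hcount : ('#' :: rest).count '#' = rest.count '#' + 1 := by simp
      rw [hcount]
      have hcell : pvCell '#' = "#" := rfl
      simp only [List.map_cons, hcell]
      rw [pdWhileA]
      have hmem : "#" ∈ done ++ "#" :: rest.map pvCell := by simp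
      rw [if_pos hmem]
      have hidx : PySem.List.index? (done ++ "#" :: rest.map pvCell) "#" = some done.length :=
        (PySem.List.index?_eq_some_iff _ _ _).mpr ⟨done, rest.map pvCell, rfl, rfl, hd⟩
      rw [hidx]
      dsimp only
      have hset : (done ++ "#" :: rest.map pvCell).set done.length (PySem.Int.toStr counter)
          = (done ++ [PySem.Int.toStr counter]) ++ rest.map pvCell := by
        rw [List.set_append]
        simp
      rw [hset]
      have hd' : "#" ∉ done ++ [PySem.Int.toStr counter] := by
        simp [hd]
        intro hx
        exact toStr_ne_hash counter hx.symm
      rw [ih (done ++ [PySem.Int.toStr counter]) i ((rows.set i.toNat true)) (cols.set done.length true) (counter + 1) hd']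
      simp only [pdScan]
      have hlen : (done ++ [PySem.Int.toStr counter]).length = done.length + 1 := by simp
      rw [hlen]
      simp [List.set_set]
    · have hcount : (c :: rest).count '#' = rest.count '#' := by simp [hc]
      rw [hcount]
      have hassoc : done ++ (c :: rest).map pvCell = (done ++ [pvCell c]) ++ rest.map pvCell := by simp
      rw [hassoc]
      have hd' : "#" ∉ done ++ [pvCell c] := by
        simp [hd]
        intro hx
        apply hc
        have := congrArg String.toList hx
        have h2 : '#' = c := by simpa [pvCell] using this
        exact h2.symm
      rw [ih (done ++ [pvCell c]) i rows cols counter hd']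
      simp only [pdScan]
      rw [if_neg hc]
      have hlen : (done ++ [pvCell c]).length = done.length + 1 := by simp
      rw [hlen]
      simp [pvCell]

lemma foldB_eq_pdLines (data : List String) :
    ∀ (lab : List (List String × Bool)) (cols : List Bool) (c : Int),
      data.foldl pdStepLineB (lab, cols, c) =
        (lab ++ (pdLines data cols c).1, (pdLines data cols c).2.1, (pdLines data cols c).2.2) := by
  induction data with
  | nil => intro lab cols c; simp [pdLines]
  | cons line rest ih =>
    intro lab cols c
    simp only [List.foldl_cons, pdStepLineB, pdLines]
    rw [ih]
    simp

lemma foldA_eq_pdLines (rest : List String) :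
    ∀ (k : Nat) (g : List (List String)) (rows0 cols : List Bool) (c : Int),
      rows0.length = k →
      (PySem.List.enumerate rest (k : Int)).foldl pdStepLineA
          (g, rows0 ++ List.replicate rest.length false, cols, c) =
        (g ++ (pdLines rest cols c).1.map (·.1),
         rows0 ++ (pdLines rest cols c).1.map (·.2),
         (pdLines rest cols c).2.1, (pdLines rest cols c).2.2) := by
  induction rest with
  | nil => intro k g rows0 cols c hk; simp [pdLines, PySem.List.enumerate]
  | cons line rest ih =>
    intro k g rows0 cols c hk
    rw [PySem.List.enumerate_cons]
    simp only [List.foldl_cons]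
    have hstep : pdStepLineA (g, rows0 ++ List.replicate (line :: rest).length false, cols, c) ((k:Int), line)
        = (g ++ [(pdScan line.toList.dropLast 0 cols c).1],
           (if (pdScan line.toList.dropLast 0 cols c).2.2.2 then
              (rows0 ++ List.replicate (line :: rest).length false).set k true
            else (rows0 ++ List.replicate (line :: rest).length false)),
           (pdScan line.toList.dropLast 0 cols c).2.1,
           (pdScan line.toList.dropLast 0 cols c).2.2.1) := by
      simp only [pdStepLineA]
      have hv : PySem.List.slice (line.toList.map pvCell) none (some (-1))
          = line.toList.dropLast.map pvCell := by
        rw [PySem.List.slice_to_neg_one]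
        exact List.map_dropLast.symm
      rw [hv, count_map_cell]
      have := whileA_eq_scan line.toList.dropLast [] (k:Int)
        (rows0 ++ List.replicate (line :: rest).length false) cols c (by simp)
      simp only [List.nil_append, List.length_nil] at this
      rw [this]
      simp
    rw [hstep]
    have hrep : List.replicate (line :: rest).length false
        = false :: List.replicate rest.length false := by simp [List.replicate]
    have hset : (rows0 ++ List.replicate (line :: rest).length false).set k true
        = (rows0 ++ [true]) ++ List.replicate rest.length false := by
      rw [hrep, List.set_append]
      simp [hk]
    have hnoset : rows0 ++ List.replicate (line :: rest).length false
        = (rows0 ++ [false]) ++ List.replicate rest.length false := by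
      rw [hrep]; simp
    have hrows : (if (pdScan line.toList.dropLast 0 cols c).2.2.2 then
          (rows0 ++ List.replicate (line :: rest).length false).set k true
        else (rows0 ++ List.replicate (line :: rest).length false))
        = (rows0 ++ [(pdScan line.toList.dropLast 0 cols c).2.2.2])
            ++ List.replicate rest.length false := by
      cases hb : (pdScan line.toList.dropLast 0 cols c).2.2.2 with
      | false => rw [if_neg (by simp)]; exact hnoset
      | true => rw [if_pos rfl]; exact hset
    rw [hrows]
    have hcast : (k : Int) + 1 = ((k + 1 : Nat) : Int) := by push_cast; ring
    rw [hcast]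
    rw [ih (k + 1) (g ++ [(pdScan line.toList.dropLast 0 cols c).1])
        (rows0 ++ [(pdScan line.toList.dropLast 0 cols c).2.2.2])
        (pdScan line.toList.dropLast 0 cols c).2.1
        (pdScan line.toList.dropLast 0 cols c).2.2.1 (by simp [hk])]
    simp only [pdLines]
    simp

lemma rowPass_eq_interleave (ps : List (List String × Bool)) :
    ∀ (k off w : Nat) (done : List (List String)),
      done.length = k + off →
      ((done ++ ps.map (·.1)).headD []).length = w →
      ((PySem.List.enumerate (ps.map (·.2)) (k : Int)).foldl pdStepRowA
          (done ++ ps.map (·.1), (off : Int))).1 =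
        done ++ pvInterleave (List.replicate w ".") ps := by
  induction ps with
  | nil =>
    intro k off w done hlen hw
    simp [pvInterleave]
  | cons p ps ih =>
    intro k off w done hlen hw
    simp only [List.map_cons, PySem.List.enumerate_cons, List.foldl_cons]
    cases hb : p.2 with
    | true =>
      have hstep : pdStepRowA (done ++ p.1 :: ps.map (·.1), (off : Int)) ((k:Int), true)
          = (done ++ p.1 :: ps.map (·.1), (off : Int)) := by
        simp [pdStepRowA]
      rw [hstep]
      have hassoc : done ++ p.1 :: ps.map (·.1) = (done ++ [p.1]) ++ ps.map (·.1) := by simp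
      rw [hassoc]
      have hcast : (k : Int) + 1 = ((k + 1 : Nat) : Int) := by push_cast; ring
      rw [hcast]
      rw [ih (k + 1) off w (done ++ [p.1]) (by simp [hlen]; omega)
          (by rw [← hassoc]; exact hw)]
      simp [pvInterleave, hb]
    | false =>
      have hblank : List.replicate ((done ++ p.1 :: ps.map (·.1)).headD []).length ("." : String)
          = List.replicate w "." := by
        simp only [List.map_cons] at hw
        rw [hw]
      have hpos : (k : Int) + (off : Int) = ((done.length : Nat) : Int) := by
        omega
      have hstep : pdStepRowA (done ++ p.1 :: ps.map (·.1), (off : Int)) ((k:Int), false)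
          = ((done ++ [List.replicate w ".", p.1]) ++ ps.map (·.1), (off : Int) + 1) := by
        simp only [pdStepRowA, Bool.not_false, if_pos]
        rw [hblank, hpos, PySem.List.insert_natCast _ _ _ (by simp)]
        simp
      rw [hstep]
      have hcast : (k : Int) + 1 = ((k + 1 : Nat) : Int) := by push_cast; ring
      have hcast2 : (off : Int) + 1 = ((off + 1 : Nat) : Int) := by push_cast; ring
      rw [hcast, hcast2]
      rw [ih (k + 1) (off + 1) w (done ++ [List.replicate w ".", p.1])
          (by simp [hlen]; omega)
          (by
            cases done with
            | nil =>
              simp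
            | cons d ds => simpa using hw)]
      simp [pvInterleave, hb]

lemma colInner (pos : Int) (rest : List (List String)) :
    ∀ (done : List (List String)),
      (PySem.List.pyRange (done.length : Int) ((done.length + rest.length : Nat) : Int) 1).foldl
          (fun g j => g.set j.toNat (PySem.List.insert (PySem.List.pyGetD g j []) pos "."))
          (done ++ rest) =
        done ++ rest.map (fun r => PySem.List.insert r pos ".") := by
  induction rest with
  | nil =>
    intro done
    rw [PySem.List.pyRange_one_eq_nil (by simp)]
    simp
  | cons r rs ih =>
    intro done
    rw [PySem.List.pyRange_one_cons (by push_cast; simp)]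
    simp only [List.foldl_cons]
    have hget : PySem.List.pyGetD (done ++ r :: rs) ((done.length : Nat) : Int) []
        = r := by
      rw [PySem.List.pyGetD_natCast]
      simp [List.getD]
    have hset : (done ++ r :: rs).set ((done.length : Nat) : Int).toNat
        (PySem.List.insert (PySem.List.pyGetD (done ++ r :: rs) (done.length : Int) []) pos ".")
        = (done ++ [PySem.List.insert r pos "."]) ++ rs := by
      rw [hget, List.set_append]
      simp
    rw [hset]
    have hr1 : (done.length : Int) + 1 = (((done ++ [PySem.List.insert r pos "."]).length : Nat) : Int) := by
      simp
    have hr2 : ((done.length + (r :: rs).length : Nat) : Int)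
        = (((done ++ [PySem.List.insert r pos "."]).length + rs.length : Nat) : Int) := by
      simp; omega
    rw [hr1, hr2, ih]
    simp

lemma colInner0 (pos : Int) (g : List (List String)) :
    (PySem.List.pyRange 0 (g.length : Int) 1).foldl
        (fun g' j => g'.set j.toNat (PySem.List.insert (PySem.List.pyGetD g' j []) pos "."))
        g =
      g.map (fun r => PySem.List.insert r pos ".") := by
  have := colInner pos g []
  simpa using this

lemma colPass_eq_map (flags : List Bool) :
    ∀ (k off : Nat) (g : List (List String)) (h : List String → List String),
      ((PySem.List.enumerate flags (k : Int)).foldl pdStepColA (g.map h, (off : Int))).1 =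
        g.map (fun r => pdColRow flags k off (h r)) := by
  induction flags with
  | nil => intro k off g h; simp [pdColRow]
  | cons f fs ih =>
    intro k off g h
    simp only [PySem.List.enumerate_cons, List.foldl_cons]
    cases f with
    | true =>
      have hstep : pdStepColA (g.map h, (off : Int)) ((k:Int), true) = (g.map h, (off : Int)) := by
        simp [pdStepColA]
      rw [hstep]
      have hcast : (k : Int) + 1 = ((k + 1 : Nat) : Int) := by push_cast; ring
      rw [hcast, ih (k + 1) off g h]
      simp [pdColRow]
    | false =>
      have hstep : pdStepColA (g.map h, (off : Int)) ((k:Int), false)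
          = (g.map (fun r => PySem.List.insert (h r) ((k : Int) + (off : Int)) "."),
             (off : Int) + 1) := by
        simp only [pdStepColA, Bool.not_false, if_pos]
        rw [colInner0]
        simp [List.map_map, Function.comp_def]
      rw [hstep]
      have hcast : (k : Int) + 1 = ((k + 1 : Nat) : Int) := by push_cast; ring
      have hcast2 : (off : Int) + 1 = ((off + 1 : Nat) : Int) := by push_cast; ring
      rw [hcast, hcast2,
        ih (k + 1) (off + 1) g (fun r => PySem.List.insert (h r) ((k : Int) + (off : Int)) ".")]
      simp [pdColRow]

lemma colRow_eq_expand (fs : List Bool) :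
    ∀ (k off : Nat) (done todo : List String),
      (todo = [] → done.length ≤ k + off) →
      (todo ≠ [] → done.length = k + off) →
      pdColRow fs k off (done ++ todo) = done ++ pdExpand fs todo := by
  induction fs with
  | nil => intro k off done todo h1 h2; simp [pdColRow, pdExpand]
  | cons f fs ih =>
    intro k off done todo h1 h2
    cases todo with
    | nil =>
      cases f with
      | true =>
        simp only [pdColRow]
        rw [ih (k + 1) off done [] (fun _ => by have := h1 rfl; omega) (fun h => absurd rfl h)]
        simp [pdExpand]
      | false =>
        simp only [pdColRow]
        have hins : PySem.List.insert (done ++ []) ((k : Int) + (off : Int)) "."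
            = (done ++ ["."]) ++ [] := by
          have hc : (k : Int) + (off : Int) = ((k + off : Nat) : Int) := by push_cast; ring
          rw [hc, insert_ge _ _ _ (by simpa using h1 rfl)]
          simp
        rw [hins, ih (k + 1) (off + 1) (done ++ ["."]) []
            (fun _ => by have := h1 rfl; simp; omega) (fun h => absurd rfl h)]
        simp [pdExpand]
    | cons c cs =>
      have hlen : done.length = k + off := h2 (by simp)
      cases f with
      | true =>
        simp only [pdColRow]
        have hassoc : done ++ c :: cs = (done ++ [c]) ++ cs := by simp
        rw [hassoc, ih (k + 1) off (done ++ [c]) cs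
            (fun _ => by simp [hlen]) (fun _ => by simp [hlen]; omega)]
        simp [pdExpand]
      | false =>
        simp only [pdColRow]
        have hc : (k : Int) + (off : Int) = ((done.length : Nat) : Int) := by omega
        have hins : PySem.List.insert (done ++ c :: cs) ((k : Int) + (off : Int)) "."
            = (done ++ [".", c]) ++ cs := by
          rw [hc, PySem.List.insert_natCast _ _ _ (by simp)]
          simp
        rw [hins, ih (k + 1) (off + 1) (done ++ [".", c]) cs
            (fun _ => by simp [hlen]; omega) (fun _ => by simp [hlen]; omega)]
        simp [pdExpand]

lemma colRow0 (fs : List Bool) (r : List String) : pdColRow fs 0 0 r = pdExpand fs r := by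
  have := colRow_eq_expand fs 0 0 [] r (by simp) (by simp)
  simpa using this

-- Source B's comprehension over enumerate produces exactly gapsOf
lemma gaps_eq (fs : List Bool) :
    ∀ (k : Nat),
      ((PySem.List.enumerate fs (k : Int)).filter (fun p => !p.2)).map (·.1) = gapsOf k fs := by
  induction fs with
  | nil => intro k; simp [PySem.List.enumerate, gapsOf]
  | cons f fs ih =>
    intro k
    rw [PySem.List.enumerate_cons]
    have hcast : (k : Int) + 1 = ((k + 1 : Nat) : Int) := by push_cast; ring
    rw [hcast]
    cases f with
    | false =>
      rw [List.filter_cons_of_pos (by simp), List.map_cons, ih (k + 1)]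
      simp [gapsOf]
    | true =>
      rw [List.filter_cons_of_neg (by simp), ih (k + 1)]
      simp [gapsOf]

-- cells.take n ++ (cells.drop n).take 1 = cells.take (n+1)
lemma take_succ_split {α : Type} (l : List α) (n : Nat) :
    l.take n ++ (l.drop n).take 1 = l.take (n + 1) := by
  rw [List.take_add]

lemma expand_take_one (fs : List Bool) (g : Bool) (cs : List String) :
    pdExpand (g :: fs) cs
      = (if g then [] else ["."]) ++ cs.take 1 ++ pdExpand fs (cs.drop 1) := by
  cases cs <;> cases g <;> simp [pdExpand]

-- the splice loop over the gap positions realises the merge pdExpand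
lemma spliceLoop_eq_expand (fs : List Bool) :
    ∀ (k prev : Nat) (out cells : List String), prev ≤ k →
      (pdSpliceLoop cells out (prev : Int) (gapsOf k fs)).1
        ++ PySem.List.slice cells (some (pdSpliceLoop cells out (prev : Int) (gapsOf k fs)).2) none
      = out ++ (cells.drop prev).take (k - prev) ++ pdExpand fs (cells.drop k) := by
  induction fs with
  | nil =>
    intro k prev out cells hpk
    simp only [gapsOf, pdSpliceLoop, pdExpand]
    rw [PySem.List.slice_from_natCast]
    have : (cells.drop prev).take (k - prev) ++ cells.drop k = cells.drop prev := by
      have hk : cells.drop k = (cells.drop prev).drop (k - prev) := by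
        rw [List.drop_drop]; congr 1; omega
      rw [hk, List.take_append_drop]
    simp [this]
  | cons f fs ih =>
    intro k prev out cells hpk
    cases f with
    | true =>
      have hg : gapsOf k (true :: fs) = gapsOf (k + 1) fs := by simp [gapsOf]
      rw [hg, ih (k + 1) prev out cells (by omega)]
      rw [expand_take_one]
      have hdk : cells.drop (k + 1) = (cells.drop k).drop 1 := by rw [List.drop_drop]
      have htk : (cells.drop prev).take (k + 1 - prev)
          = (cells.drop prev).take (k - prev) ++ (cells.drop k).take 1 := by
        have hk : cells.drop k = (cells.drop prev).drop (k - prev) := by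
          rw [List.drop_drop]; congr 1; omega
        rw [hk, take_succ_split]
        congr 1; omega
      rw [hdk, htk]
      simp
    | false =>
      have hg : gapsOf k (false :: fs) = (k : Int) :: gapsOf (k + 1) fs := by simp [gapsOf]
      rw [hg]
      simp only [pdSpliceLoop]
      have hc1 : (k : Int) + 1 = ((k + 1 : Nat) : Int) := by push_cast; ring
      rw [hc1, ih (k + 1) (k + 1) _ cells (by omega)]
      rw [expand_take_one]
      have hsl1 : PySem.List.slice cells (some (prev : Int)) (some (k : Int))
          = (cells.drop prev).take (k - prev) := by rw [PySem.List.slice_natCast]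
      have hsl2 : PySem.List.slice cells (some (k : Int)) (some ((k + 1 : Nat) : Int))
          = (cells.drop k).take 1 := by
        rw [PySem.List.slice_natCast]
        congr 1; omega
      have hdk : cells.drop (k + 1) = (cells.drop k).drop 1 := by rw [List.drop_drop]
      rw [hsl1, hsl2, hdk]
      simp

lemma expandB_eq_expand (fs : List Bool) (cells : List String) :
    pdExpandB cells (gapsOf 0 fs) = pdExpand fs cells := by
  have h := spliceLoop_eq_expand fs 0 0 [] cells (Nat.le_refl 0)
  simpa [pdExpandB] using h

lemma gridB_eq_map (gaps : List Int) (cols : List Bool) (blank pad : List String)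
    (hbl : blank = pdExpand cols pad)
    (hg : ∀ cs, pdExpandB cs gaps = pdExpand cols cs) (ps : List (List String × Bool)) :
    ∀ (acc : List (List String)),
      ps.foldl
          (fun g p => g ++ (if p.2 then [pdExpandB p.1 gaps] else [blank, pdExpandB p.1 gaps]))
          acc =
        acc ++ (pvInterleave pad ps).map (pdExpand cols) := by
  induction ps with
  | nil => intro acc; simp [pvInterleave]
  | cons p ps ih =>
    intro acc
    simp only [List.foldl_cons]
    rw [ih]
    cases hb : p.2 <;> simp [pvInterleave, hb, hg, hbl]

lemma lines_head_len (d0 : String) (ds : List String) (cols : List Bool) (c : Int) :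
    ((pdLines (d0 :: ds) cols c).1.map (·.1)).headD [] =
      (pdScan d0.toList.dropLast 0 cols c).1 := by
  simp [pdLines]

-- ===== VERDICT (by name: the statement is the Claim_ definition above) =====
theorem parseData_spec : Claim_equal_parseData := by
  intro data hdom hpre
  obtain ⟨hne, -⟩ := hpre
  rcases data with - | ⟨d0, ds⟩
  · exact absurd rfl hne
  show parseData (d0 :: ds) = parseData_alt (d0 :: ds)
  simp only [parseData, parseData_alt]
  simp only [PySem.List.pyGet?_zero_cons, Option.getD_some]
  -- phase 1 on both sides
  have hA1 := foldA_eq_pdLines (d0 :: ds) 0 [] [] (List.replicate d0.toList.length false) 0 rfl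
  simp only [List.nil_append, Nat.cast_zero] at hA1
  have hB1 := foldB_eq_pdLines (d0 :: ds) [] (List.replicate d0.toList.length false) 0
  simp only [List.nil_append] at hB1
  rw [hA1, hB1]
  set L := pdLines (d0 :: ds) (List.replicate d0.toList.length false) 0 with hL
  -- the first graph row has length len(data[0]) - 1
  have hw : ((L.1.map (·.1)).headD []).length = d0.toList.length - 1 := by
    rw [hL, lines_head_len, scan_len]
    simp
  -- phase 2 (A's blank-row pass)
  have hA2 := rowPass_eq_interleave L.1 0 0 (d0.toList.length - 1) []
    (by simp) (by simpa using hw)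
  simp only [List.nil_append, Nat.cast_zero] at hA2
  rw [hA2]
  -- phase 3 (A's blank-column pass)
  have hA3 := colPass_eq_map L.2.1 0 0
    (pvInterleave (List.replicate (d0.toList.length - 1) ".") L.1) id
  simp only [List.map_id, Nat.cast_zero, id] at hA3
  rw [hA3]
  -- B's rebuild: gaps are the galaxy-free column positions, splicing realises pdExpand
  have hgaps : ((PySem.List.enumerate L.2.1 0).filter (fun p => !p.2)).map (·.1)
      = gapsOf 0 L.2.1 := by
    have := gaps_eq L.2.1 0
    simpa using this
  rw [hgaps]
  rw [gridB_eq_map (gapsOf 0 L.2.1) L.2.1 _ (List.replicate (d0.toList.length - 1) ".")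
      (expandB_eq_expand L.2.1 _).symm.symm
      (fun cs => expandB_eq_expand L.2.1 cs) L.1 []]
  · simp only [List.nil_append]
    congr 1
    apply List.map_congr_left
    intro r _
    exact colRow0 L.2.1 r
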